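-- pv_equiv track=rewrite | github.com/ZisanSarker/cryto-zs | Hill_cipher.py | matrix_cofactor
-- ===== SOURCE A (Python) =====
-- def get_matrix_minor(matrix, i, j):
--     # Remove row i and column j from matrix
--     return [
--         [matrix[row][col] for col in range(len(matrix)) if col != j]
--         for row in range(len(matrix)) if row != i
--     ]
--
-- def matrix_determinant(matrix):
--     size = len(matrix)
--     if size == 1:
--         return matrix[0][0] % 26
--     if size == 2:
--         return (matrix[0][0]*matrix[1][1] - matrix[0][1]*matrix[1][0]) % 26
--     det = 0
--     for c in range(size):
--         cofactor = ((-1) ** c) * matrix[0][c] * matrix_determinant(get_matrix_minor(matrix, 0, c))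
--         det = (det + cofactor) % 26
--     return det
--
-- def matrix_cofactor(matrix):
--     size = len(matrix)
--     cof = []
--     for i in range(size):
--         row = []
--         for j in range(size):
--             minor = get_matrix_minor(matrix, i, j)
--             cofactor = ((-1) ** (i + j)) * matrix_determinant(minor)
--             row.append(cofactor % 26)
--         cof.append(row)
--     return cof
-- ===== SOURCE B (Python) =====
-- def matrix_cofactor(matrix):
--     n = len(matrix)
--
--     def det(rows, cols, memo):
--         key = tuple(cols)
--         v = memo.get(key)
--         if v is not None:
--             return v
--         if not rows:
--             return 1
--         r, rest = rows[0], rows[1:]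
--         total = 0
--         for k in range(len(cols)):
--             total += ((-1) ** k) * r[cols[k]] * det(rest, cols[:k] + cols[k + 1:], memo)
--         memo[key] = total
--         return total
--
--     cols = list(range(n))
--     out = []
--     for i in range(n):
--         rows = matrix[:i] + matrix[i + 1:]
--         memo = {}
--         out.append([(((-1) ** (i + j)) * det(rows, cols[:j] + cols[j + 1:], memo)) % 26
--                     for j in range(n)])
--     return out
-- ===== Notes on version B (the rewrite author's own statement) =====
-- stated objective: alternative
-- what changed: B never materializes minors: a determinant helper recurses over the row list with a column-index list and memoizes results per column subset in a dict (dynamic programming over column subsets, shared across the n cofactors of each row), with a single mod-26 reduction per entry, instead of A's naive cofactor recursion that rebuilds an (n-1)x(n-1) sub-list for every expansion step.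
-- intended difference: On 1x1 matrices A returns [[0]] because its determinant of the empty 0x0 minor falls through the loop to 0, while B returns [[1]], the intended cofactor since the determinant of the empty matrix is 1. — e.g. on matrix_cofactor([[5]]): A returns [[0]], B returns [[1]]
import Mathlib
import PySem

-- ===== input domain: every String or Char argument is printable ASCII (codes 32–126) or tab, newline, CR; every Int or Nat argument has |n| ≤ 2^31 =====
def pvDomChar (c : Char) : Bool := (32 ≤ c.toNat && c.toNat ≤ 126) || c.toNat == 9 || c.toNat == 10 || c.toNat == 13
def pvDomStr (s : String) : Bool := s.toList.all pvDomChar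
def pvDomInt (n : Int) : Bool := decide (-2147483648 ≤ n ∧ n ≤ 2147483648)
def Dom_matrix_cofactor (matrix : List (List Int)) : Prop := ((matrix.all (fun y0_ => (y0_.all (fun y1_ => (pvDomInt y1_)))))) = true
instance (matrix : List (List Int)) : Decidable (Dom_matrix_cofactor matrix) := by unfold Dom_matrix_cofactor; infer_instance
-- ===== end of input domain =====

-- B replaces A's naive cofactor recursion (which materializes an (n-1)×(n-1) minor at every
-- expansion step) by a determinant on (row list, column-index list) memoized per column subset.
-- On 1×1 matrices A returns [[0]] and B the intended [[1]] (see D_).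

-- ===== PORT A =====
-- Indexing note: list indices here are range-values (Nat, nonnegative); `List.getD` with a default
-- is exact wherever Python's indexing succeeds, and Pre_ excludes the inputs where Python raises
-- IndexError.
def get_matrix_minor (matrix : List (List Int)) (i j : Nat) : List (List Int) :=
  ((List.range matrix.length).filter (fun row => row ≠ i)).map (fun row =>
    ((List.range matrix.length).filter (fun col => col ≠ j)).map (fun col =>
      (matrix.getD row []).getD col 0))

-- Recursion on the fuel `len matrix` (each minor is one row smaller); the fuel-0 branch returns 0,
-- exactly what the then-empty `for c in range(0)` loop leaves in `det`.
def matrix_determinant_aux : Nat → List (List Int) → Int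
  | fuel, matrix =>
    if matrix.length = 1 then PySem.Int.mod ((matrix.getD 0 []).getD 0 0) 26
    else if matrix.length = 2 then
      PySem.Int.mod ((matrix.getD 0 []).getD 0 0 * (matrix.getD 1 []).getD 1 0
        - (matrix.getD 0 []).getD 1 0 * (matrix.getD 1 []).getD 0 0) 26
    else
      match fuel with
      | 0 => 0
      | f + 1 =>
        (List.range matrix.length).foldl
          (fun det c =>
            PySem.Int.mod (det + (-1 : Int) ^ c * (matrix.getD 0 []).getD c 0 *
              matrix_determinant_aux f (get_matrix_minor matrix 0 c)) 26) 0

def matrix_determinant (matrix : List (List Int)) : Int :=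
  matrix_determinant_aux matrix.length matrix

def matrix_cofactor (matrix : List (List Int)) : List (List Int) :=
  (List.range matrix.length).foldl (fun cof i =>
    cof ++ [(List.range matrix.length).foldl (fun row j =>
      row ++ [PySem.Int.mod ((-1 : Int) ^ (i + j) *
        matrix_determinant (get_matrix_minor matrix i j)) 26]) []]) []

-- ===== PORT B =====
-- det(rows, cols, memo) of Source B: first-row expansion over a column-index list, results memoized in
-- `memo` keyed by the column list; returns (value, updated memo) since the Python dict is mutated.
def pvDet : List (List Int) → List Nat → PySem.Dict (List Nat) Int → Int × PySem.Dict (List Nat) Int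
  | rows, cols, memo =>
    match memo.get? cols with
    | some v => (v, memo)
    | none =>
      match rows with
      | [] => (1, memo)
      | r :: rest =>
        let s := (List.range cols.length).foldl
          (fun (st : Int × PySem.Dict (List Nat) Int) k =>
            let p := pvDet rest (cols.take k ++ cols.drop (k + 1)) st.2
            (st.1 + (-1 : Int) ^ k * r.getD (cols.getD k 0) 0 * p.1, p.2))
          (0, memo)
        (s.1, s.2.insert cols s.1)

-- the inner list comprehension threads the mutated memo left to right: a fold over (row, memo)
def matrix_cofactor_alt (matrix : List (List Int)) : List (List Int) :=
  let n := matrix.length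
  let cols := List.range n
  (List.range n).foldl (fun out i =>
    let rows := matrix.take i ++ matrix.drop (i + 1)
    let inner := (List.range n).foldl
      (fun (st : List Int × PySem.Dict (List Nat) Int) j =>
        let p := pvDet rows (cols.take j ++ cols.drop (j + 1)) st.2
        (st.1 ++ [PySem.Int.mod ((-1 : Int) ^ (i + j) * p.1) 26], p.2))
      ([], PySem.Dict.empty)
    out ++ [inner.1]) []

-- ===== PRECONDITION & SPEC =====
-- For n ≥ 2 the Python A indexes every row at every column below n, so it raises IndexError iff
-- some row is shorter than n; for n ≤ 1 it indexes nothing and always returns.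
def Pre_matrix_cofactor (matrix : List (List Int)) : Prop :=
  matrix.length ≤ 1 ∨ ∀ row ∈ matrix, matrix.length ≤ row.length
instance (matrix : List (List Int)) : Decidable (Pre_matrix_cofactor matrix) := by
  unfold Pre_matrix_cofactor; infer_instance
def pvWitness_matrix_cofactor : List (List Int) := [[1, 2], [3, 4]]

-- On 1×1 matrices A returns [[0]] because its determinant of the empty 0×0 minor falls through the
-- loop to 0, while B returns [[1]], the intended cofactor since the determinant of the empty matrix is 1.
def D_matrix_cofactor (matrix : List (List Int)) : Prop := matrix.length = 1
instance (matrix : List (List Int)) : Decidable (D_matrix_cofactor matrix) := by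
  unfold D_matrix_cofactor; infer_instance

def Spec_matrix_cofactor (matrix : List (List Int)) (out : List (List Int)) : Prop :=
  ¬ D_matrix_cofactor matrix → out = matrix_cofactor_alt matrix
instance (matrix : List (List Int)) (out : List (List Int)) : Decidable (Spec_matrix_cofactor matrix out) := by
  unfold Spec_matrix_cofactor; infer_instance

def pvDiffWitness_matrix_cofactor : List (List Int) := [[5]]
def pvDiffWitnessOut_matrix_cofactor : (List (List Int)) × (List (List Int)) := ([[0]], [[1]])

-- ===== CLAIM (what is proved, stated in full; the proofs are below) =====
def Claim_unchanged_matrix_cofactor : Prop := ∀ (matrix : List (List Int)), Dom_matrix_cofactor matrix → Pre_matrix_cofactor matrix → Spec_matrix_cofactor matrix (matrix_cofactor matrix)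
def Claim_changed_matrix_cofactor : Prop := Dom_matrix_cofactor (pvDiffWitness_matrix_cofactor) ∧ Pre_matrix_cofactor (pvDiffWitness_matrix_cofactor) ∧ D_matrix_cofactor (pvDiffWitness_matrix_cofactor) ∧ matrix_cofactor (pvDiffWitness_matrix_cofactor) = pvDiffWitnessOut_matrix_cofactor.1 ∧ matrix_cofactor_alt (pvDiffWitness_matrix_cofactor) = pvDiffWitnessOut_matrix_cofactor.2 ∧ pvDiffWitnessOut_matrix_cofactor.1 ≠ pvDiffWitnessOut_matrix_cofactor.2
def Claim_exact_matrix_cofactor : Prop := ∀ (matrix : List (List Int)), Dom_matrix_cofactor matrix → Pre_matrix_cofactor matrix → D_matrix_cofactor matrix → matrix_cofactor matrix ≠ matrix_cofactor_alt matrix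

-- ===== LEMMAS AND PROOFS =====

-- the memo-free determinant both ports compute: first-row expansion over a column-index list
def detP : List (List Int) → List Nat → Int
  | [], _ => 1
  | r :: rest, cols =>
    ((List.range cols.length).map (fun k =>
      (-1 : Int) ^ k * r.getD (cols.getD k 0) 0 *
        detP rest (cols.take k ++ cols.drop (k + 1)))).sum

theorem pv_getD_map {α β : Type} (f : α → β) (l : List α) (k : Nat) (d : α) (d' : β)
    (hk : k < l.length) : (l.map f).getD k d' = f (l.getD k d) := by
  simp [List.getD_eq_getElem?_getD, hk]

theorem pv_take_range (i n : Nat) (h : i ≤ n) : (List.range n).take i = List.range i := by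
  apply List.ext_getElem
  · simp [h]
  · intro k h1 h2; simp

theorem pv_drop_range (n m : Nat) : (List.range n).drop m = List.range' m (n - m) := by
  apply List.ext_getElem
  · simp
  · intro k h1 h2; simp [List.getElem_range']

theorem pv_map_getD_range' {α : Type} (l : List α) (d : α) (a b : Nat) (h : a + b ≤ l.length) :
    (List.range' a b).map (fun k => l.getD k d) = (l.drop a).take b := by
  apply List.ext_getElem
  · simp; omega
  · intro k h1 h2
    simp only [List.getElem_map, List.getElem_range', List.getElem_take, List.getElem_drop]
    have hk : a + k < l.length := by simp at h1; omega
    simp [List.getD_eq_getElem?_getD, hk]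

theorem pv_take_eq_map_range {α : Type} (l : List α) (d : α) (i : Nat) (h : i ≤ l.length) :
    (List.range i).map (fun k => l.getD k d) = l.take i := by
  rw [List.range_eq_range', pv_map_getD_range' l d 0 i (by omega), List.drop_zero]

theorem pv_filter_ne_range (n i : Nat) (h : i < n) :
    (List.range n).filter (fun x => x ≠ i) = List.range i ++ (List.range n).drop (i + 1) := by
  induction n with
  | zero => omega
  | succ n ih =>
    rw [List.range_succ, List.filter_append]
    by_cases hin : i = n
    · subst hin
      have h1 : (List.range i).filter (fun x => x ≠ i) = List.range i := by
        apply List.filter_eq_self.mpr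
        intro x hx; simp at hx ⊢; omega
      have h4 : [i].filter (fun x => x ≠ i) = [] := by simp
      have h5 : (List.range i ++ [i]).drop (i + 1) = [] := by
        apply List.drop_eq_nil_of_le
        simp
      rw [h1, h4, h5]
    · have hi : i < n := by omega
      rw [ih hi]
      have h2 : (List.range n ++ [n]).drop (i + 1) = (List.range n).drop (i + 1) ++ [n] :=
        List.drop_append_of_le_length (by simp; omega)
      have h3 : [n].filter (fun x => x ≠ i) = [n] := by simp; omega
      rw [h2, h3, List.append_assoc]

theorem pv_map_index {a b : Type} (l : List a) (d : a) (F : a -> b)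
    (idx : List Nat) (sel : List a)
    (h : idx.map (fun k => l.getD k d) = sel) :
    idx.map (fun k => F (l.getD k d)) = sel.map F := by
  subst h
  rw [List.map_map]
  rfl

theorem pv_minor_eq (matrix : List (List Int)) (i j : Nat)
    (hi : i < matrix.length) (hj : j < matrix.length) :
    get_matrix_minor matrix i j
      = (matrix.take i ++ matrix.drop (i + 1)).map (fun r =>
          ((List.range matrix.length).take j ++ (List.range matrix.length).drop (j + 1)).map
            (fun c => r.getD c 0)) := by
  unfold get_matrix_minor
  rw [pv_filter_ne_range matrix.length i hi, pv_filter_ne_range matrix.length j hj,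
    pv_take_range j matrix.length hj.le]
  rw [List.map_append, List.map_append]
  congr 1
  · exact pv_map_index matrix []
      (fun r => (List.range j ++ (List.range matrix.length).drop (j + 1)).map
        (fun c => r.getD c 0)) (List.range i) (matrix.take i)
      (pv_take_eq_map_range matrix [] i hi.le)
  · refine pv_map_index matrix []
      (fun r => (List.range j ++ (List.range matrix.length).drop (j + 1)).map
        (fun c => r.getD c 0)) ((List.range matrix.length).drop (i + 1))
      (matrix.drop (i + 1)) ?_
    rw [pv_drop_range, pv_map_getD_range' matrix ([] : List Int) (i + 1)
      (matrix.length - (i + 1)) (by omega)]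
    exact List.take_of_length_le (by simp)

theorem pv_detP_select (rows : List (List Int)) (cols : List Nat) :
    ∀ (sel : List Nat), (∀ s ∈ sel, s < cols.length) →
    detP (rows.map (fun r => cols.map (fun c => r.getD c 0))) sel
      = detP rows (sel.map (fun s => cols.getD s 0)) := by
  induction rows with
  | nil => intro sel _; simp [detP]
  | cons r rest ih =>
    intro sel hsel
    simp only [List.map_cons, detP, List.length_map]
    refine congrArg List.sum (List.map_congr_left ?_)
    intro k hk
    rw [List.mem_range] at hk
    have hmem : sel.getD k 0 ∈ sel := by
      rw [List.getD_eq_getElem?_getD, List.getElem?_eq_getElem hk]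
      exact List.getElem_mem hk
    have hsk : sel.getD k 0 < cols.length := hsel _ hmem
    rw [pv_getD_map (fun c => r.getD c 0) cols (sel.getD k 0) 0 0 hsk,
      pv_getD_map (fun s => cols.getD s 0) sel k 0 0 hk,
      ← List.map_take, ← List.map_drop, ← List.map_append,
      ih (sel.take k ++ sel.drop (k + 1)) (by
        intro s hs
        rcases List.mem_append.mp hs with h' | h'
        · exact hsel s (List.mem_of_mem_take h')
        · exact hsel s (List.mem_of_mem_drop h'))]

theorem pv_map_getD_range_self (cols : List Nat) :
    (List.range cols.length).map (fun s => cols.getD s 0) = cols := by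
  apply List.ext_getElem
  · simp
  · intro k h1 h2
    simp [List.getD_eq_getElem?_getD, h2]

theorem pv_detP_materialize (rows : List (List Int)) (cols : List Nat) :
    detP (rows.map (fun r => cols.map (fun c => r.getD c 0))) (List.range cols.length)
      = detP rows cols := by
  rw [pv_detP_select rows cols (List.range cols.length)
    (by intro s hs; exact List.mem_range.mp hs), pv_map_getD_range_self]

theorem pv_mod26 (x : Int) : PySem.Int.mod x 26 = x % 26 :=
  PySem.Int.mod_eq_emod_of_pos (by norm_num)

theorem pv_mod_mul_mod (a x : Int) :
    PySem.Int.mod (a * PySem.Int.mod x 26) 26 = PySem.Int.mod (a * x) 26 := by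
  simp only [pv_mod26]
  rw [Int.mul_emod a (x % 26), Int.emod_emod_of_dvd x dvd_rfl, ← Int.mul_emod]

theorem pv_foldl_mod (g : Nat → Int) (l : List Nat) :
    ∀ (a : Int), l.foldl (fun d c => PySem.Int.mod (d + g c) 26) (PySem.Int.mod a 26)
      = PySem.Int.mod (a + (l.map g).sum) 26 := by
  induction l with
  | nil => intro a; simp
  | cons c l ih =>
    intro a
    simp only [List.foldl_cons, List.map_cons, List.sum_cons]
    have h1 : PySem.Int.mod (PySem.Int.mod a 26 + g c) 26 = PySem.Int.mod (a + g c) 26 := by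
      simp only [pv_mod26]; exact Int.emod_add_emod a 26 (g c)
    rw [h1, ih (a + g c)]
    congr 1; ring

theorem pv_foldl_mod_zero (g : Nat → Int) (l : List Nat) :
    l.foldl (fun d c => PySem.Int.mod (d + g c) 26) 0 = PySem.Int.mod ((l.map g).sum) 26 := by
  have := pv_foldl_mod g l 0
  simpa using this

theorem pv_sum_mod_congr (l : List Nat) (g h : Nat → Int)
    (H : ∀ c ∈ l, PySem.Int.mod (g c) 26 = PySem.Int.mod (h c) 26) :
    PySem.Int.mod ((l.map g).sum) 26 = PySem.Int.mod ((l.map h).sum) 26 := by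
  induction l with
  | nil => simp
  | cons c l ih =>
    simp only [List.map_cons, List.sum_cons, pv_mod26] at *
    rw [Int.add_emod, H c (by simp), ih (fun c' hc' => H c' (by simp [hc'])), ← Int.add_emod]

theorem pv_det_eq_detP : ∀ (fuel : Nat) (M : List (List Int)), fuel = M.length →
    1 ≤ M.length →
    matrix_determinant_aux fuel M = PySem.Int.mod (detP M (List.range M.length)) 26 := by
  intro fuel
  induction fuel with
  | zero => intro M hf h1; omega
  | succ f ih =>
    intro M hf h1
    rw [matrix_determinant_aux.eq_def]
    by_cases hlen1 : M.length = 1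
    · obtain ⟨r, rfl⟩ := List.length_eq_one_iff.mp hlen1
      simp [detP, List.range_succ]
    · by_cases hlen2 : M.length = 2
      · obtain ⟨r0, r1, rfl⟩ := List.length_eq_two.mp hlen2
        simp [detP, List.range_succ]
        ring_nf
      · have hn3 : 3 ≤ M.length := by
          rcases M with _ | ⟨r, rest⟩
          · simp at h1
          · rcases rest with _ | ⟨r2, rest2⟩
            · simp at hlen1
            · rcases rest2 with _ | _ <;> simp_all
        rcases M with _ | ⟨r, rest⟩
        · simp at h1
        · simp only [if_neg hlen1, if_neg hlen2]
          rw [pv_foldl_mod_zero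
            (fun c => (-1 : Int) ^ c * ((r :: rest).getD 0 []).getD c 0 *
              matrix_determinant_aux f (get_matrix_minor (r :: rest) 0 c))]
          conv_rhs => rw [show detP (r :: rest) (List.range (r :: rest).length)
            = ((List.range (r :: rest).length).map (fun k =>
                (-1 : Int) ^ k * r.getD ((List.range (r :: rest).length).getD k 0) 0 *
                detP rest ((List.range (r :: rest).length).take k ++
                  (List.range (r :: rest).length).drop (k + 1)))).sum from by
              simp [detP]]
          apply pv_sum_mod_congr
          intro c hc
          rw [List.mem_range] at hc
          have hminor := pv_minor_eq (r :: rest) 0 c (by omega) hc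
          simp only [List.take_zero, List.drop_succ_cons, List.drop_zero,
            List.nil_append] at hminor
          have hcolslen : ((List.range (r :: rest).length).take c ++
              (List.range (r :: rest).length).drop (c + 1)).length
              = (r :: rest).length - 1 := by
            have hc2 : c < rest.length + 1 := by simpa using hc
            simp only [List.length_append, List.length_take, List.length_drop,
              List.length_range, List.length_cons]
            omega
          have hminlen : (get_matrix_minor (r :: rest) 0 c).length = (r :: rest).length - 1 := by
            rw [hminor]
            simp only [List.length_map, List.length_cons, Nat.add_sub_cancel]
          have hIH := ih (get_matrix_minor (r :: rest) 0 c) (by omega) (by omega)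
          rw [hIH, hminlen]
          have hgetD : ((r :: rest).getD 0 ([] : List Int)) = r := rfl
          have hrange : (List.range (r :: rest).length).getD c 0 = c := by
            have hc' : c < rest.length + 1 := by simpa using hc
            simp [List.getD_eq_getElem?_getD, hc']
          rw [hgetD, hrange, pv_mod_mul_mod]
          congr 2
          rw [hminor, show List.range ((r :: rest).length - 1)
            = List.range ((List.range (r :: rest).length).take c ++
                (List.range (r :: rest).length).drop (c + 1)).length from by rw [hcolslen]]
          exact pv_detP_materialize rest _

-- memo invariant: every stored value is the determinant of the matching suffix of R
def pvInv (R : List (List Int)) (memo : PySem.Dict (List Nat) Int) : Prop :=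
  ∀ c v, memo.get? c = some v →
    c.length ≤ R.length ∧ v = detP (R.drop (R.length - c.length)) c

theorem pv_pvDet_correct (R : List (List Int)) :
    ∀ (rows : List (List Int)) (cols : List Nat) (memo : PySem.Dict (List Nat) Int),
    rows = R.drop (R.length - cols.length) → cols.length ≤ R.length → pvInv R memo →
    (pvDet rows cols memo).1 = detP rows cols ∧ pvInv R (pvDet rows cols memo).2 := by
  intro rows
  induction rows with
  | nil =>
    intro cols memo hrow hlen hinv
    rw [pvDet.eq_def]
    cases hget : memo.get? cols with
    | some v =>
      refine ⟨?_, by simpa [hget] using hinv⟩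
      have := (hinv cols v hget).2
      simp [hget, detP, this, ← hrow]
    | none => simp [hget, detP, hinv]
  | cons r rest ih =>
    intro cols memo hrow hlen hinv
    rw [pvDet.eq_def]
    cases hget : memo.get? cols with
    | some v =>
      refine ⟨?_, by simpa [hget] using hinv⟩
      have := (hinv cols v hget).2
      simp [hget, this, ← hrow]
    | none =>
      have hc1 : 1 ≤ cols.length := by
        by_contra hc
        have hc0 : cols.length = 0 := by omega
        rw [hc0, Nat.sub_zero, List.drop_length] at hrow
        exact (List.cons_ne_nil r rest) hrow
      have hrest : rest = R.drop (R.length - (cols.length - 1)) := by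
        have h' : rest = (R.drop (R.length - cols.length)).drop 1 := by
          rw [← hrow]; rfl
        rw [h', List.drop_drop]
        congr 1
        omega
      have key : ∀ (l : List Nat) (t : Int) (m : PySem.Dict (List Nat) Int),
          (∀ k ∈ l, k < cols.length) → pvInv R m →
          ((l.foldl (fun (st : Int × PySem.Dict (List Nat) Int) k =>
              let p := pvDet rest (cols.take k ++ cols.drop (k + 1)) st.2
              (st.1 + (-1 : Int) ^ k * r.getD (cols.getD k 0) 0 * p.1, p.2)) (t, m)).1
            = t + (l.map (fun k => (-1 : Int) ^ k * r.getD (cols.getD k 0) 0 *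
                detP rest (cols.take k ++ cols.drop (k + 1)))).sum
            ∧ pvInv R ((l.foldl (fun (st : Int × PySem.Dict (List Nat) Int) k =>
              let p := pvDet rest (cols.take k ++ cols.drop (k + 1)) st.2
              (st.1 + (-1 : Int) ^ k * r.getD (cols.getD k 0) 0 * p.1, p.2)) (t, m)).2)) := by
        intro l
        induction l with
        | nil => intro t m _ hm; exact ⟨by simp, by simpa using hm⟩
        | cons k l ihl =>
          intro t m hkl hm
          simp only [List.foldl_cons, List.map_cons, List.sum_cons]
          have hk : k < cols.length := hkl k (by simp)
          have hck : (cols.take k ++ cols.drop (k + 1)).length = cols.length - 1 := by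
            simp [List.length_drop]; omega
          have hcall := ih (cols.take k ++ cols.drop (k + 1)) m
            (by rw [hck]; exact hrest) (by omega) hm
          obtain ⟨hv, hinv'⟩ := hcall
          obtain ⟨h1', h2'⟩ := ihl
            (t + (-1 : Int) ^ k * r.getD (cols.getD k 0) 0 *
              (pvDet rest (cols.take k ++ cols.drop (k + 1)) m).1)
            ((pvDet rest (cols.take k ++ cols.drop (k + 1)) m).2)
            (fun k' hk' => hkl k' (by simp [hk'])) hinv'
          constructor
          · simp only at h1' ⊢
            rw [h1', hv]
            ring
          · simpa using h2'
      obtain ⟨h1, h2⟩ := key (List.range cols.length) 0 memo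
        (fun k hk => List.mem_range.mp hk) hinv
      simp only [hget]
      constructor
      · simp only [detP]
        simp only at h1
        rw [h1]
        simp
      · intro c v hgetc
        rw [PySem.Dict.get?_insert] at hgetc
        by_cases hc : c = cols
        · subst hc
          rw [if_pos rfl] at hgetc
          have hgev := Option.some.inj hgetc
          refine ⟨hlen, ?_⟩
          rw [← hrow, ← hgev, h1]
          simp [detP]
        · rw [if_neg hc] at hgetc
          exact h2 c v hgetc

theorem pv_inv_empty (R : List (List Int)) : pvInv R PySem.Dict.empty := by
  intro c v h
  rw [PySem.Dict.get?_empty] at h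
  cases h

theorem pv_entry_eq (matrix : List (List Int)) (i j : Nat)
    (hn2 : 2 ≤ matrix.length) (hi : i < matrix.length) (hj : j < matrix.length) :
    PySem.Int.mod ((-1 : Int) ^ (i + j) *
        matrix_determinant (get_matrix_minor matrix i j)) 26
      = PySem.Int.mod ((-1 : Int) ^ (i + j) *
          detP (matrix.take i ++ matrix.drop (i + 1))
            ((List.range matrix.length).take j ++ (List.range matrix.length).drop (j + 1))) 26 := by
  have hminor := pv_minor_eq matrix i j hi hj
  have hminlen : (get_matrix_minor matrix i j).length = matrix.length - 1 := by
    rw [hminor]; simp; omega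
  have hcolslen : ((List.range matrix.length).take j ++
      (List.range matrix.length).drop (j + 1)).length = matrix.length - 1 := by
    simp [List.length_drop]; omega
  unfold matrix_determinant
  rw [pv_det_eq_detP (get_matrix_minor matrix i j).length (get_matrix_minor matrix i j) rfl
    (by omega), hminlen, pv_mod_mul_mod]
  congr 2
  rw [hminor, show List.range (matrix.length - 1)
    = List.range ((List.range matrix.length).take j ++
        (List.range matrix.length).drop (j + 1)).length from by rw [hcolslen]]
  exact pv_detP_materialize _ _

-- ===== VERDICT (by name: the statement is the Claim_ definition above) =====
theorem matrix_cofactor_spec : Claim_unchanged_matrix_cofactor := by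
  intro matrix _ _ hD
  by_cases h0 : matrix.length = 0
  · rw [List.length_eq_zero_iff.mp h0]
    rfl
  · have hD' : matrix.length ≠ 1 := hD
    have hn2 : 2 ≤ matrix.length := by omega
    unfold matrix_cofactor matrix_cofactor_alt
    simp only [PySem.List.foldl_append_singleton_eq_map, List.nil_append]
    apply List.map_congr_left
    intro i hi
    rw [List.mem_range] at hi
    have hrowslen : (matrix.take i ++ matrix.drop (i + 1)).length = matrix.length - 1 := by
      simp; omega
    have inner_key : ∀ (l : List Nat) (acc : List Int) (m : PySem.Dict (List Nat) Int),
        (∀ j ∈ l, j < matrix.length) → pvInv (matrix.take i ++ matrix.drop (i + 1)) m →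
        ((l.foldl (fun (st : List Int × PySem.Dict (List Nat) Int) j =>
            let p := pvDet (matrix.take i ++ matrix.drop (i + 1))
              ((List.range matrix.length).take j ++ (List.range matrix.length).drop (j + 1)) st.2
            (st.1 ++ [PySem.Int.mod ((-1 : Int) ^ (i + j) * p.1) 26], p.2)) (acc, m)).1
          = acc ++ l.map (fun j => PySem.Int.mod ((-1 : Int) ^ (i + j) *
              detP (matrix.take i ++ matrix.drop (i + 1))
                ((List.range matrix.length).take j ++
                  (List.range matrix.length).drop (j + 1))) 26)) := by
      intro l
      induction l with
      | nil => intro acc m _ _; simp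
      | cons j l ihl =>
        intro acc m hjl hm
        have hj : j < matrix.length := hjl j (by simp)
        have hcolslen : ((List.range matrix.length).take j ++
            (List.range matrix.length).drop (j + 1)).length = matrix.length - 1 := by
          simp [List.length_drop]; omega
        have hcall := pv_pvDet_correct (matrix.take i ++ matrix.drop (i + 1))
          (matrix.take i ++ matrix.drop (i + 1))
          ((List.range matrix.length).take j ++ (List.range matrix.length).drop (j + 1)) m
          (by rw [hcolslen, hrowslen, Nat.sub_self, List.drop_zero]) (by omega) hm
        obtain ⟨hv, hinv'⟩ := hcall
        simp only [List.foldl_cons, List.map_cons]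
        rw [ihl _ _ (fun j' hj' => hjl j' (by simp [hj'])) hinv']
        rw [hv]
        simp
    rw [inner_key (List.range matrix.length) [] PySem.Dict.empty
      (fun j hj => List.mem_range.mp hj) (pv_inv_empty _)]
    simp only [List.nil_append]
    apply List.map_congr_left
    intro j hj
    rw [List.mem_range] at hj
    exact pv_entry_eq matrix i j hn2 hi hj

theorem matrix_cofactor_changed : Claim_changed_matrix_cofactor := by
  unfold Claim_changed_matrix_cofactor; decide

theorem matrix_cofactor_tight : Claim_exact_matrix_cofactor := by
  intro matrix _ _ hD
  obtain ⟨r, rfl⟩ := List.length_eq_one_iff.mp hD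
  have hA : matrix_cofactor [r] = [[0]] := by
    have hm : get_matrix_minor [r] 0 0 = [] := by simp [get_matrix_minor]
    simp [matrix_cofactor, matrix_determinant, hm,
      show matrix_determinant_aux 0 [] = 0 from rfl, List.range_succ]
  have hB : matrix_cofactor_alt [r] = [[1]] := by
    simp [matrix_cofactor_alt, List.range_succ,
      show pvDet [] [] PySem.Dict.empty = (1, PySem.Dict.empty) from rfl]
  rw [hA, hB]
  decide
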